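-- pv_equiv track=rewrite | github.com/sangwon1338/coding-test | 프로그래머스 1단계/수박수박수박수박수?/solution.py | solution
-- ===== SOURCE A (Python) =====
-- def solution(n):
--     answer = ''
--     for i in range(int(n/2)):
--
--         answer += '수박'
--     if n%2 == 1:
--         answer += '수'
--     if n == 1 :
--         answer = '수'
--
--
--     return answer
-- ===== SOURCE B (Python) =====
-- def solution(n):
--     return '수박' * int(n/2) + ('수' if n % 2 == 1 else '')
-- ===== Notes on version B (the rewrite author's own statement) =====
-- stated objective: idiomatic
-- what changed: Replaces the per-iteration accumulation loop and the redundant odd-length special case with a closed form: string repetition of the two-character block plus a conditional trailing character.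
import Mathlib
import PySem

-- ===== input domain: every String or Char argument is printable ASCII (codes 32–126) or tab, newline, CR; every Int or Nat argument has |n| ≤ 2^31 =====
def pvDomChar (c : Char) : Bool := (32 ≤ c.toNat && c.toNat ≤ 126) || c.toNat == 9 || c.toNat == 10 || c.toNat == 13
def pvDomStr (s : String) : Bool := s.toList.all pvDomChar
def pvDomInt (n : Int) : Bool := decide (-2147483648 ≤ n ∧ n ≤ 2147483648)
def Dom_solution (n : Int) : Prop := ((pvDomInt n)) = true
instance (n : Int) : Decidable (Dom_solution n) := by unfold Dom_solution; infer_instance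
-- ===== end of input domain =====

-- B replaces A's append loop (and its redundant special case for odd length 1) with a closed form:
-- repeat '수박' int(n/2) times and append '수' when n is odd.

-- ===== PORT A =====
-- int(n/2) truncates toward zero for |n| ≤ 2^31 (exact in float): Int.tdiv
def solution (n : Int) : String :=
  let answer := ""
  let answer := (PySem.List.pyRange 0 (Int.tdiv n 2) 1).foldl (fun a _ => a ++ "수박") answer
  let answer := if PySem.Int.mod n 2 = 1 then answer ++ "수" else answer
  let answer := if n = 1 then "수" else answer
  answer

-- ===== PORT B =====
-- '수박' * int(n/2): negative repeat count yields '' (Int.toNat clamps, matching Python)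
def solution_alt (n : Int) : String :=
  String.join (List.replicate (Int.tdiv n 2).toNat "수박")
    ++ (if PySem.Int.mod n 2 = 1 then "수" else "")

-- ===== PRECONDITION & SPEC =====
def Spec_solution (n : Int) (out : String) : Prop := out = solution_alt n
instance (n : Int) (out : String) : Decidable (Spec_solution n out) := by unfold Spec_solution; infer_instance

-- ===== CLAIM (what is proved, stated in full; the proofs are below) =====
def Claim_equal_solution : Prop := ∀ (n : Int), Dom_solution n → Spec_solution n (solution n)

-- ===== LEMMAS AND PROOFS =====

theorem foldl_append_start (l : List String) (a : String) :
    l.foldl (fun r s => r ++ s) a = a ++ l.foldl (fun r s => r ++ s) "" := by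
  induction l generalizing a with
  | nil => simp
  | cons x xs ih =>
      rw [List.foldl_cons, List.foldl_cons, ih ("" ++ x), ih (a ++ x), String.append_assoc]
      simp

theorem join_cons_watermelon (l : List String) :
    String.join ("수박" :: l) = "수박" ++ String.join l := by
  show List.foldl (fun r s => r ++ s) "" ("수박" :: l) = _
  rw [List.foldl_cons, foldl_append_start l ("" ++ "수박")]
  rfl

-- A's append loop over any list produces the joined replicate of its length.
theorem foldl_append_const (l : List Int) (s : String) :
    l.foldl (fun a _ => a ++ "수박") s = s ++ String.join (List.replicate l.length "수박") := by
  induction l generalizing s with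
  | nil => simp [String.join]
  | cons x xs ih =>
      rw [List.foldl_cons, ih, List.length_cons, List.replicate_succ, join_cons_watermelon,
        String.append_assoc]

-- ===== VERDICT (by name: the statement is the Claim_ definition above) =====
theorem solution_spec : Claim_equal_solution := by
  intro n _
  show solution n = solution_alt n
  by_cases h1 : n = 1
  · subst h1; decide
  · unfold solution solution_alt
    dsimp only
    rw [foldl_append_const]
    simp only [h1, if_false, PySem.List.length_pyRange_one]
    split_ifs <;> simp
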